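-- pv_equiv track=rewrite | github.com/srivakshay/hackathon | utils/prompts.py | __generate_ui_prompt
-- ===== SOURCE A (Python) =====
-- def __generate_ui_prompt(domain_mappings, tables):
--     domain_tables = {}
--     for table in tables:
--         if domain_mappings[table] not in domain_tables:
--             domain_tables[domain_mappings[table]] = [table]
--         else:
--             domain_tables[domain_mappings[table]].append(table)
--     prompt = "There are " + str(len(domain_tables)) + " domain(s)" + " in this plsql code "
--     domain_names = domain_tables.copy();
--     for domain in domain_tables:
--         domain_names.pop(domain)
--         prompt += domain
--         if len(domain_names) > 0:
--             prompt += " and "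
--     prompt += ". "
--     domain_tables_copy = domain_tables.copy()
--     for domain in domain_tables:
--         prompt += "Generating code with table(s) " + ",".join(
--             domain_tables[domain]) + " as one spring boot application "
--         domain_tables_copy.pop(domain)
--         if len(domain_tables_copy) > 0:
--             prompt += "and "
--     return prompt
-- ===== SOURCE B (Python) =====
-- def __generate_ui_prompt(domain_mappings, tables):
--     # No grouping dict: dedup the mapped domains, then recover each domain's
--     # tables by filtering the original list.
--     domains = list(dict.fromkeys(domain_mappings[t] for t in tables))
--     return ("There are " + str(len(domains)) + " domain(s)" + " in this plsql code "
--             + " and ".join(domains)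
--             + ". "
--             + "and ".join("Generating code with table(s) "
--                           + ",".join(t for t in tables if domain_mappings[t] == d)
--                           + " as one spring boot application " for d in domains))
-- ===== Notes on version B (the rewrite author's own statement) =====
-- stated objective: simpler
-- what changed: B drops A's dict-of-lists grouping and the two copy-the-dict-and-pop separator loops entirely: it dedups the mapped domain list (dict.fromkeys) and rebuilds each domain's tables by filtering the original table list, assembling the prompt with str.join.
import Mathlib
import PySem

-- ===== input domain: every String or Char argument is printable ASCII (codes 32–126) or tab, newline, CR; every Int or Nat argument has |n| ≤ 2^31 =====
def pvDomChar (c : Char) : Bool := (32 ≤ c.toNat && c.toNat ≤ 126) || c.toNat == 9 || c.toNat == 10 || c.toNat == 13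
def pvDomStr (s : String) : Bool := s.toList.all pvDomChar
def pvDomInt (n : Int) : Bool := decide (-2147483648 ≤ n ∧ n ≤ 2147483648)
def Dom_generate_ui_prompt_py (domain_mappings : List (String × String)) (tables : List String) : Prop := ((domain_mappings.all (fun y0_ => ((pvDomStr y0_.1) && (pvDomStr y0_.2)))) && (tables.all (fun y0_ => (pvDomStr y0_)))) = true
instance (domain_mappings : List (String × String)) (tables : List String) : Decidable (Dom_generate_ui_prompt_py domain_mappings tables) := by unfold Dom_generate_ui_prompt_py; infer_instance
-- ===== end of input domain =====

-- B drops A's grouping dict and copy-and-pop separator loops: it dedups the mapped domains and joins per-domain filters of the table list (simpler decomposition, same cost).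

-- ===== PORT A =====
def generate_ui_prompt_py (domain_mappings : List (String × String)) (tables : List String) : String :=
  let dm : PySem.Dict String String := PySem.Dict.mk domain_mappings
  let domain_tables : PySem.Dict String (List String) :=
    tables.foldl (fun dt table =>
      -- domain_mappings[table]; a missing key raises KeyError in Python → excluded by Pre_
      let key := (dm.get? table).getD ""
      if dt.contains key = false then dt.insert key [table]
      else dt.modify key [] (fun l => l ++ [table])) PySem.Dict.empty
  let prompt := "There are " ++ PySem.Int.toStr (Int.ofNat domain_tables.size) ++ " domain(s)" ++ " in this plsql code "
  let st1 := domain_tables.keys.foldl (fun (st : PySem.Dict String (List String) × String) domain =>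
      let names := st.1.erase domain
      (names, st.2 ++ domain ++ (if names.size > 0 then " and " else ""))) (domain_tables, prompt)
  let prompt := st1.2 ++ ". "
  let st2 := domain_tables.keys.foldl (fun (st : PySem.Dict String (List String) × String) domain =>
      let copy := st.1.erase domain
      (copy, st.2 ++ ("Generating code with table(s) " ++ PySem.Str.join "," (domain_tables.getD domain []) ++ " as one spring boot application ")
        ++ (if copy.size > 0 then "and " else ""))) (domain_tables, prompt)
  st2.2

-- ===== PORT B =====
def generate_ui_prompt_py_alt (domain_mappings : List (String × String)) (tables : List String) : String :=
  let dm : PySem.Dict String String := PySem.Dict.mk domain_mappings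
  -- list(dict.fromkeys(domain_mappings[t] for t in tables)) = ordered dedup of the mapped list
  let domains := PySem.List.dedup (tables.map (fun t => (dm.get? t).getD ""))
  "There are " ++ PySem.Int.toStr (Int.ofNat domains.length) ++ " domain(s)" ++ " in this plsql code "
    ++ PySem.Str.join " and " domains
    ++ ". "
    ++ PySem.Str.join "and " (domains.map (fun d =>
         "Generating code with table(s) "
           ++ PySem.Str.join "," (tables.filter (fun t => (dm.get? t).getD "" == d))
           ++ " as one spring boot application "))

-- ===== PRECONDITION & SPEC =====
-- Pre_ excludes exactly the inputs where some table is not a key of domain_mappings: there Python A raises KeyError.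
def Pre_generate_ui_prompt_py (domain_mappings : List (String × String)) (tables : List String) : Prop :=
  ∀ t ∈ tables, (PySem.Dict.mk domain_mappings).contains t = true
instance (domain_mappings : List (String × String)) (tables : List String) : Decidable (Pre_generate_ui_prompt_py domain_mappings tables) := by unfold Pre_generate_ui_prompt_py; infer_instance
def pvWitness_generate_ui_prompt_py : (List (String × String)) × List String :=
  ([("t1", "d1"), ("t2", "d1"), ("t3", "d2")], ["t1", "t3", "t2"])

def Spec_generate_ui_prompt_py (domain_mappings : List (String × String)) (tables : List String) (out : String) : Prop := out = generate_ui_prompt_py_alt domain_mappings tables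
instance (domain_mappings : List (String × String)) (tables : List String) (out : String) : Decidable (Spec_generate_ui_prompt_py domain_mappings tables out) := by unfold Spec_generate_ui_prompt_py; infer_instance

-- ===== CLAIM (what is proved, stated in full; the proofs are below) =====
def Claim_equal_generate_ui_prompt_py : Prop := ∀ (domain_mappings : List (String × String)) (tables : List String), Dom_generate_ui_prompt_py domain_mappings tables → Pre_generate_ui_prompt_py domain_mappings tables → Spec_generate_ui_prompt_py domain_mappings tables (generate_ui_prompt_py domain_mappings tables)

-- ===== LEMMAS AND PROOFS =====

-- A's if/else grouping step equals a plain modify (= append-to-group) step.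
theorem group_step_eq (dt : PySem.Dict String (List String)) (key : String) (table : String) :
    (if dt.contains key = false then dt.insert key [table]
     else dt.modify key [] (fun l => l ++ [table]))
    = dt.modify key [] (fun l => l ++ [table]) := by
  by_cases h : dt.contains key = false
  · simp only [h, PySem.Dict.modify]
    have hg : dt.get? key = none := by
      rw [PySem.Dict.get?_eq_none_iff_contains]; exact h
    simp [PySem.Dict.getD, hg]
  · simp [h]

-- join sep [x] = x  and  join sep (a :: b :: l) = a ++ sep ++ join sep (b :: l), at String level
theorem join_singleton' (sep x : String) : PySem.Str.join sep [x] = x := by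
  rw [← String.toList_inj]
  simp [PySem.Str.toList_join, PySem.Chars.join_singleton]

theorem join_cons_cons' (sep a b : String) (l : List String) :
    PySem.Str.join sep (a :: b :: l) = a ++ sep ++ PySem.Str.join sep (b :: l) := by
  rw [← String.toList_inj]
  simp [PySem.Str.toList_join, PySem.Chars.join_cons_cons, String.toList_append]

-- The copy-and-pop separator loop over the dict's own (nodup) keys equals a join.
theorem popjoin (sep : String) (seg : String → String) :
    ∀ (its : List (String × List String)) (p : String),
      (its.map Prod.fst).Nodup →
      (List.foldl (fun (st : PySem.Dict String (List String) × String) d =>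
          let c := st.1.erase d
          (c, st.2 ++ seg d ++ (if c.size > 0 then sep else "")))
        (PySem.Dict.mk its, p) (its.map Prod.fst)).2
      = p ++ PySem.Str.join sep ((its.map Prod.fst).map seg) := by
  intro its
  induction its with
  | nil =>
      intro p _
      rw [← String.toList_inj]
      simp [PySem.Str.toList_join, PySem.Chars.join, String.toList_append, List.intercalate]
  | cons kv rest ih =>
      intro p hnd
      obtain ⟨k, v⟩ := kv
      simp only [List.map_cons, List.nodup_cons, List.mem_map] at hnd
      obtain ⟨hk, hrest⟩ := hnd
      have herase : (PySem.Dict.mk ((k, v) :: rest)).erase k = PySem.Dict.mk rest := by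
        simp only [PySem.Dict.erase, List.filter]
        have : (!k == k) = false := by simp
        rw [this]
        congr 1
        apply List.filter_eq_self.mpr
        intro q hq
        have hqk : q.1 ≠ k := fun h => hk ⟨q, hq, h⟩
        simp [hqk]
      simp only [List.map_cons, List.foldl_cons, herase]
      rw [ih (p ++ seg k ++ (if (PySem.Dict.mk rest).size > 0 then sep else "")) hrest]
      cases rest with
      | nil =>
        simp only [PySem.Dict.size, List.length_nil, List.map_nil]
        rw [join_singleton']
        rw [← String.toList_inj]
        simp [String.toList_append]
      | cons b rb =>
        have hs : (PySem.Dict.mk (b :: rb)).size > 0 := by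
          simp [PySem.Dict.size]
        rw [if_pos hs]
        simp only [List.map_cons]
        rw [join_cons_cons']
        rw [← String.toList_inj]
        simp [String.toList_append]

theorem generate_ui_prompt_py_spec : Claim_equal_generate_ui_prompt_py := by
  intro domain_mappings tables _ _
  unfold Spec_generate_ui_prompt_py generate_ui_prompt_py generate_ui_prompt_py_alt
  simp only [group_step_eq]
  set dm : PySem.Dict String String := PySem.Dict.mk domain_mappings with hdm
  set dt : PySem.Dict String (List String) :=
    tables.foldl (fun dt table => dt.modify ((dm.get? table).getD "") [] (fun l => l ++ [table])) PySem.Dict.empty with hdt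
  -- the grouping dict's keys are the ordered dedup of the mapped domains
  have hkeysdom : dt.keys = PySem.List.dedup (tables.map (fun t => (dm.get? t).getD "")) := by
    rw [hdt, PySem.Dict.keys_foldl_modify_key, PySem.List.dedup_eq_ofList]
    simp [PySem.Dict.keys, PySem.Dict.empty, PySem.Set.update_nil_left]
  -- its stored group for d is the filter of the table list
  have hgetD : ∀ d, dt.getD d [] = tables.filter (fun t => (dm.get? t).getD "" == d) := by
    intro d
    rw [hdt]
    have : tables.foldl (fun dt table => dt.modify ((dm.get? table).getD "") [] (fun l => l ++ [table])) PySem.Dict.empty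
        = (tables.map (fun t => (((dm.get? t).getD ""), t))).foldl
            (fun dt p => dt.modify p.1 [] (fun l => l ++ [p.2])) PySem.Dict.empty := by
      rw [List.foldl_map]
    rw [this, PySem.Dict.getD_foldl_modify_append]
    simp [List.filter_map, Function.comp_def]
  have hnd : dt.keys.Nodup := by
    rw [hdt]
    exact PySem.Dict.nodup_keys_foldl_modify_key tables (fun table => (dm.get? table).getD "")
      [] (fun _ table => fun l => l ++ [table]) PySem.Dict.empty (by simp)
  have hmk : PySem.Dict.mk dt.items = dt := rfl
  have hnd' : (dt.items.map Prod.fst).Nodup := hnd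
  show (List.foldl (fun (st : PySem.Dict String (List String) × String) d =>
      let c := st.1.erase d
      (c, st.2 ++ (fun d => "Generating code with table(s) " ++ PySem.Str.join "," (dt.getD d []) ++ " as one spring boot application ") d ++ (if c.size > 0 then "and " else "")))
    (PySem.Dict.mk dt.items,
      (List.foldl (fun (st : PySem.Dict String (List String) × String) d =>
          let c := st.1.erase d
          (c, st.2 ++ (fun d => d) d ++ (if c.size > 0 then " and " else "")))
        (PySem.Dict.mk dt.items,
          "There are " ++ PySem.Int.toStr (Int.ofNat dt.size) ++ " domain(s)" ++ " in this plsql code ")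
        (dt.items.map Prod.fst)).2 ++ ". ")
    (dt.items.map Prod.fst)).2
    = "There are " ++ PySem.Int.toStr (Int.ofNat (PySem.List.dedup (tables.map (fun t => (dm.get? t).getD ""))).length) ++ " domain(s)" ++ " in this plsql code "
        ++ PySem.Str.join " and " (PySem.List.dedup (tables.map (fun t => (dm.get? t).getD "")))
        ++ ". "
        ++ PySem.Str.join "and " ((PySem.List.dedup (tables.map (fun t => (dm.get? t).getD ""))).map (fun d =>
             "Generating code with table(s) " ++ PySem.Str.join "," (tables.filter (fun t => (dm.get? t).getD "" == d)) ++ " as one spring boot application "))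
  rw [popjoin " and " (fun d => d) dt.items _ hnd']
  rw [popjoin "and " (fun d => "Generating code with table(s) " ++ PySem.Str.join "," (dt.getD d []) ++ " as one spring boot application ") dt.items _ hnd']
  have hkeys : dt.items.map Prod.fst = dt.keys := rfl
  have hsize : dt.size = dt.keys.length := by
    simp [PySem.Dict.size, PySem.Dict.keys]
  simp only [List.map_id', hkeys, hsize, hkeysdom, hgetD]
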